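-- pv_equiv track=rewrite | github.com/ouril/python-Homework | home_work_4.py | fifth
-- ===== SOURCE A (Python) =====
-- def fifth(list):
--     buf = 1
--     result = 0
--     for i in list:
--         if i.isdigit():
--             result = int(i)* buf
--             buf = int(i)
--     return result
-- ===== SOURCE B (Python) =====
-- def fifth(list):
--     # tail scan: walk backwards, grab the last two digit-strings, stop early
--     picked = []
--     for i in reversed(list):
--         if i.isdigit():
--             picked.append(int(i))
--             if len(picked) == 2:
--                 break
--     if not picked:
--         return 0
--     if len(picked) == 1:
--         return picked[0]
--     return picked[0] * picked[1]
-- ===== Notes on version B (the rewrite author's own statement) =====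
-- stated objective: alternative
-- what changed: B replaces A's full left-to-right fold carrying a (buf,result) pair by a reversed short-circuit scan that collects at most the last two digit-strings and multiplies them.
import Mathlib
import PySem

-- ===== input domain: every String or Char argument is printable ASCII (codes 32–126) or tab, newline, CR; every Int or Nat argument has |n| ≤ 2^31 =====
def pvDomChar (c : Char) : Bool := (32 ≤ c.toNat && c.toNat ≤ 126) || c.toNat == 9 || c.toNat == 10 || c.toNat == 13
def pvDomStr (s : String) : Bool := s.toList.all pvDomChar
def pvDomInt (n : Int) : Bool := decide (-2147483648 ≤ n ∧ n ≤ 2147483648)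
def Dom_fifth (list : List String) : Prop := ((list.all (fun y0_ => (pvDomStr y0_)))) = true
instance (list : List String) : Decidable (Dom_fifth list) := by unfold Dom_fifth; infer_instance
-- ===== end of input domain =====

-- B scans the list from the back and stops after the last two digit-strings, instead of A's full fold; same result, different decomposition.

-- ===== PORT A =====
-- state is (buf, result); per digit-string i: result := int(i)*buf; buf := int(i)
def fifth (list : List String) : Int :=
  (list.foldl
    (fun (st : Int × Int) i =>
      if PySem.Str.strIsdigit i then
        ((PySem.Int.ofStr? i).getD 0, (PySem.Int.ofStr? i).getD 0 * st.1)
      else st)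
    (1, 0)).2

-- ===== PORT B =====
-- collect ints of digit-strings into acc, stopping as soon as acc has two elements
def fifthAltGo (acc : List Int) : List String → List Int
  | [] => acc
  | i :: rest =>
    if PySem.Str.strIsdigit i then
      let acc' := acc ++ [(PySem.Int.ofStr? i).getD 0]
      if acc'.length = 2 then acc' else fifthAltGo acc' rest
    else fifthAltGo acc rest

def fifth_alt (list : List String) : Int :=
  match fifthAltGo [] list.reverse with
  | [] => 0
  | [a] => a
  | a :: b :: _ => a * b

-- ===== PRECONDITION & SPEC =====
def Spec_fifth (list : List String) (out : Int) : Prop := out = fifth_alt list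
instance (list : List String) (out : Int) : Decidable (Spec_fifth list out) := by unfold Spec_fifth; infer_instance

-- ===== CLAIM (what is proved, stated in full; the proofs are below) =====
def Claim_equal_fifth : Prop := ∀ (list : List String), Dom_fifth list → Spec_fifth list (fifth list)

-- ===== LEMMAS AND PROOFS =====

def pvStepI (st : Int × Int) (d : Int) : Int × Int := (d, d * st.1)

def pvVal (i : String) : Int := (PySem.Int.ofStr? i).getD 0

theorem pv_fst_foldl (ds : List Int) (b r : Int) :
    (ds.foldl pvStepI (b, r)).1 = ds.getLast?.getD b := by
  induction ds generalizing b r with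
  | nil => rfl
  | cons d rest ih =>
    rw [List.foldl_cons]
    show (rest.foldl pvStepI (d, d * b)).1 = _
    rw [ih]
    rcases hx : (d :: rest).getLast? with _ | x
    · simp at hx
    · cases rest with
      | nil => simp_all
      | cons y t => simp [List.getLast?_cons_cons] at hx ⊢; simp [hx]

theorem pv_foldA (l : List String) (st : Int × Int) :
    l.foldl
      (fun (st : Int × Int) i =>
        if PySem.Str.strIsdigit i then
          ((PySem.Int.ofStr? i).getD 0, (PySem.Int.ofStr? i).getD 0 * st.1)
        else st) st
    = ((l.filter (fun i => PySem.Chars.strIsdigit i.toList)).map pvVal).foldl pvStepI st := by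
  induction l generalizing st with
  | nil => rfl
  | cons i rest ih =>
    simp only [List.foldl_cons, List.filter_cons]
    by_cases h : PySem.Str.strIsdigit i = true
    · have h' : PySem.Chars.strIsdigit i.toList = true := by
        simpa [PySem.Str.strIsdigit_eq] using h
      rw [if_pos h, if_pos h', List.map_cons, List.foldl_cons]
      exact ih _
    · have h' : ¬ PySem.Chars.strIsdigit i.toList = true := by
        simpa [PySem.Str.strIsdigit_eq] using h
      rw [if_neg h, if_neg h']
      exact ih st

theorem pv_sndA (ds : List Int) :
    (ds.foldl pvStepI (1, 0)).2
      = (match ds.reverse with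
         | [] => (0 : Int)
         | [a] => a
         | a :: b :: _ => a * b) := by
  induction ds using List.reverseRecOn with
  | nil => rfl
  | append_singleton ds' d _ =>
    rw [List.foldl_append]
    show (d * (ds'.foldl pvStepI (1, 0)).1) = _
    rw [pv_fst_foldl, List.reverse_append]
    rcases h : ds'.reverse with _ | ⟨e, t⟩
    · have : ds' = [] := by simpa using congrArg List.reverse h
      subst this; simp
    · have : ds'.getLast? = some e := by
        rw [← List.head?_reverse, h]; rfl
      simp [this]

theorem pv_go (l : List String) (acc : List Int) (h : acc.length ≤ 1) :
    fifthAltGo acc l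
      = (acc ++ (l.filter (fun i => PySem.Chars.strIsdigit i.toList)).map pvVal).take 2 := by
  induction l generalizing acc with
  | nil =>
    simp only [fifthAltGo, List.filter_nil, List.map_nil, List.append_nil]
    exact (List.take_of_length_le (by omega)).symm
  | cons i rest ih =>
    by_cases hd : PySem.Chars.strIsdigit i.toList = true
    · have hdS : PySem.Str.strIsdigit i = true := by
        simpa [PySem.Str.strIsdigit_eq] using hd
      simp only [fifthAltGo]
      rw [if_pos hdS]
      by_cases h2 : (acc ++ [(PySem.Int.ofStr? i).getD 0]).length = 2
      · rw [if_pos h2]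
        have hx : acc ++ (List.map pvVal
              (List.filter (fun j => PySem.Chars.strIsdigit j.toList) (i :: rest)))
            = (acc ++ [(PySem.Int.ofStr? i).getD 0])
              ++ (List.map pvVal (List.filter (fun j => PySem.Chars.strIsdigit j.toList) rest)) := by
          simp [hd, pvVal]
        rw [hx, List.take_append_of_le_length (by rw [h2]),
            List.take_of_length_le (by rw [h2])]
      · rw [if_neg h2]
        have hacc : acc.length = 0 := by
          simp only [List.length_append, List.length_cons, List.length_nil] at h2
          omega
        rw [ih _ (by simp [hacc])]
        simp [hd, pvVal]
    · have hdS : ¬ PySem.Str.strIsdigit i = true := by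
        simpa [PySem.Str.strIsdigit_eq] using hd
      simp only [fifthAltGo]
      rw [if_neg hdS, ih acc h]
      simp [hd]

-- ===== VERDICT (by name: the statement is the Claim_ definition above) =====
theorem fifth_spec : Claim_equal_fifth := by
  intro list _
  show fifth list = fifth_alt list
  unfold fifth fifth_alt
  rw [pv_foldA, pv_sndA, pv_go _ _ (by simp)]
  rw [List.nil_append, List.filter_reverse, List.map_reverse]
  generalize ((list.filter (fun i => PySem.Chars.strIsdigit i.toList)).map pvVal).reverse = rds
  match rds with
  | [] => rfl
  | [a] => rfl
  | a :: b :: t => rfl
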